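-- pv_equiv track=rewrite | github.com/markiroberts/aoc2023 | Day08/Day08.py | getsortedcards
-- ===== SOURCE A (Python) =====
-- def getcardvalue(e):
--    if e >= '0' and e <= '9':
--        return int(e)
--    elif e == 'T':
--        return 10
--    elif e == 'J':
--        return 11
--    elif e == 'Q':
--        return 12
--    elif e == 'K':
--        return 13
--    elif e == 'A':
--        return 14
--    else:
--        return 99
--
-- def getsortedcards(cards):
--     cardlist = []
--     sortedcards = ""
--     for position in range(len(cards)):
--         onecard = cards[position]
--         cardlist.append(onecard)
--         cardlist.sort(key=getcardvalue, reverse=True)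
--     for position in range(len(cardlist)):
--         onecard = cardlist[position]
--         sortedcards = sortedcards + onecard
--     return sortedcards
-- ===== SOURCE B (Python) =====
-- ORDER = [99, 14, 13, 12, 11, 10, 9, 8, 7, 6, 5, 4, 3, 2, 1, 0]
--
-- def getcardvalue(e):
--    if e >= '0' and e <= '9':
--        return int(e)
--    elif e == 'T':
--        return 10
--    elif e == 'J':
--        return 11
--    elif e == 'Q':
--        return 12
--    elif e == 'K':
--        return 13
--    elif e == 'A':
--        return 14
--    else:
--        return 99
--
-- def getsortedcards(cards):
--     # bucket gather: emit, for each card value in fixed descending order,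
--     # the characters of that value in their original (stable) order
--     return "".join(ch for v in ORDER for ch in cards if getcardvalue(ch) == v)
-- ===== Notes on version B (the rewrite author's own statement) =====
-- stated objective: faster
-- what changed: Replaces the loop that re-sorts the whole accumulated list after every single append (an O(n^2 log n) repeated comparison sort) by a bucket gather over the 16 possible card values: concatenate, in fixed descending value order, the characters of each value in encounter order.
import Mathlib
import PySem

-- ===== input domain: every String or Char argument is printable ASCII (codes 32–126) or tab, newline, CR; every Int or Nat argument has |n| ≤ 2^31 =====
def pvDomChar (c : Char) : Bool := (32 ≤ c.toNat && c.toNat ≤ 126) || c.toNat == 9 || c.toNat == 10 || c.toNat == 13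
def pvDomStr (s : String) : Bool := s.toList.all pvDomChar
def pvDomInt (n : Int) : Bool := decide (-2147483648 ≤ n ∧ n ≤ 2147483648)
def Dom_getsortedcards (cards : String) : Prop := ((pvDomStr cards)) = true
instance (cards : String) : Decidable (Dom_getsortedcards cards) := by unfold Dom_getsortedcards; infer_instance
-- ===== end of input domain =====

-- B replaces A's "re-sort the whole list after every append" loop by a single bucket gather
-- over the 16 possible card values in fixed descending order (objective: faster).

-- ===== PORT A =====
-- helper getcardvalue, shared verbatim by both Python versions
def getcardvalue (e : Char) : Int :=
  if '0' ≤ e ∧ e ≤ '9' then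
    (PySem.Int.ofChars? [e]).getD 0   -- int(e); the guard ensures e is a digit, so int() never raises and the default is unreachable
  else if e = 'T' then 10
  else if e = 'J' then 11
  else if e = 'Q' then 12
  else if e = 'K' then 13
  else if e = 'A' then 14
  else 99

def getsortedcards (cards : String) : String :=
  let cardlist : List Char :=
    (PySem.List.pyRange 0 (PySem.Str.len cards)).foldl
      (fun cardlist position =>
        let onecard := PySem.List.pyGetD cards.toList position ' '   -- cards[position]; position is always in range
        PySem.List.sorted (cardlist ++ [onecard]) getcardvalue true) []
  let sortedcards : List Char :=
    (PySem.List.pyRange 0 (PySem.List.len cardlist)).foldl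
      (fun sortedcards position => sortedcards ++ [PySem.List.pyGetD cardlist position ' ']) []
  String.ofList sortedcards

-- ===== PORT B =====
def pvOrder : List Int := [99, 14, 13, 12, 11, 10, 9, 8, 7, 6, 5, 4, 3, 2, 1, 0]

def getsortedcards_alt (cards : String) : String :=
  String.ofList (pvOrder.flatMap (fun v => cards.toList.filter (fun ch => getcardvalue ch == v)))

-- ===== PRECONDITION & SPEC =====
def Spec_getsortedcards (cards : String) (out : String) : Prop := out = getsortedcards_alt cards
instance (cards : String) (out : String) : Decidable (Spec_getsortedcards cards out) := by unfold Spec_getsortedcards; infer_instance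

-- ===== CLAIM (what is proved, stated in full; the proofs are below) =====
def Claim_equal_getsortedcards : Prop := ∀ (cards : String), Dom_getsortedcards cards → Spec_getsortedcards cards (getsortedcards cards)

-- ===== LEMMAS AND PROOFS =====

-- the bucket-gather expression of port B, named for the proofs
def gatherB (vs : List Int) (cs : List Char) : List Char :=
  vs.flatMap (fun v => cs.filter (fun c => getcardvalue c == v))

theorem digit_cases (e : Char) (h1 : '0' ≤ e) (h2 : e ≤ '9') :
    e = '0' ∨ e = '1' ∨ e = '2' ∨ e = '3' ∨ e = '4' ∨ e = '5' ∨ e = '6' ∨ e = '7' ∨ e = '8' ∨ e = '9' := by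
  have h1' : 48 ≤ e.toNat := h1
  have h2' : e.toNat ≤ 57 := h2
  have h : e.toNat = 48 ∨ e.toNat = 49 ∨ e.toNat = 50 ∨ e.toNat = 51 ∨ e.toNat = 52 ∨ e.toNat = 53 ∨ e.toNat = 54 ∨ e.toNat = 55 ∨ e.toNat = 56 ∨ e.toNat = 57 := by omega
  obtain h|h|h|h|h|h|h|h|h|h := h <;>
    [skip; (right); (right;right); (right;right;right); (right;right;right;right);
     (right;right;right;right;right); (right;right;right;right;right;right);
     (right;right;right;right;right;right;right); (right;right;right;right;right;right;right;right);
     (right;right;right;right;right;right;right;right;right)] <;>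
    first
      | exact Or.inl (Char.ext (UInt32.toNat_inj.mp (h.trans (by decide))))
      | exact Char.ext (UInt32.toNat_inj.mp (h.trans (by decide)))

theorem key_mem (e : Char) : getcardvalue e ∈ pvOrder := by
  by_cases hd : '0' ≤ e ∧ e ≤ '9'
  · obtain he|he|he|he|he|he|he|he|he|he := digit_cases e hd.1 hd.2 <;> subst he <;> decide
  · unfold getcardvalue
    rw [if_neg hd]
    split_ifs <;> decide

theorem insertBy_append_not (before : Char → Char → Bool) (x : Char) (l t : List Char)
    (h : ∀ y ∈ l, before x y = false) :
    PySem.List.insertBy before x (l ++ t) = l ++ PySem.List.insertBy before x t := by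
  induction l with
  | nil => simp
  | cons a l ih =>
      simp only [List.cons_append, PySem.List.insertBy, h a (by simp)]
      simp [ih (fun y hy => h y (by simp [hy]))]

theorem insertBy_all (before : Char → Char → Bool) (x : Char) (l : List Char)
    (h : ∀ y ∈ l, before x y = true) :
    PySem.List.insertBy before x l = x :: l := by
  cases l with
  | nil => simp [PySem.List.insertBy]
  | cons a l => simp [PySem.List.insertBy, h a (by simp)]

theorem gather_append_notmem (vs : List Int) (x : Char) (cs : List Char)
    (h : ∀ w ∈ vs, getcardvalue x ≠ w) :
    gatherB vs (cs ++ [x]) = gatherB vs cs := by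
  unfold gatherB
  apply List.flatMap_congr  -- congruence over the value list
  intro v hv
  simp [List.filter_append, h v hv]

theorem insert_gather (vs : List Int) (hp : vs.Pairwise (· > ·)) (x : Char) (cs : List Char)
    (hx : getcardvalue x ∈ vs) :
    PySem.List.insertBy (fun a b => decide (getcardvalue b < getcardvalue a)) x (gatherB vs cs)
      = gatherB vs (cs ++ [x]) := by
  induction vs with
  | nil => simp at hx
  | cons v vs ih =>
      have hgt : ∀ w ∈ vs, v > w := (List.pairwise_cons.mp hp).1
      have hp' := (List.pairwise_cons.mp hp).2
      have hsplit : gatherB (v :: vs) cs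
          = cs.filter (fun c => getcardvalue c == v) ++ gatherB vs cs := by
        simp [gatherB]
      by_cases hxv : getcardvalue x = v
      · rw [hsplit, insertBy_append_not _ _ _ _ ?hpass, insertBy_all _ _ _ ?hfront]
        case hpass =>
          intro y hy
          have : getcardvalue y = v := by simpa using (List.mem_filter.mp hy).2
          simp [this, hxv]
        case hfront =>
          intro y hy
          obtain ⟨w, hw, -, hyw⟩ : ∃ w ∈ vs, y ∈ cs ∧ getcardvalue y = w := by
            simpa [gatherB, List.mem_flatMap, List.mem_filter] using hy
          simp [hyw, hxv]
          exact hgt w hw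
        have h1 : (cs ++ [x]).filter (fun c => getcardvalue c == v)
            = cs.filter (fun c => getcardvalue c == v) ++ [x] := by
          simp [List.filter_append, hxv]
        have h2 : gatherB vs (cs ++ [x]) = gatherB vs cs :=
          gather_append_notmem vs x cs (fun w hw => by rw [hxv]; exact ne_of_gt (hgt w hw))
        have hsplit' : gatherB (v :: vs) (cs ++ [x])
            = (cs ++ [x]).filter (fun c => getcardvalue c == v) ++ gatherB vs (cs ++ [x]) := by
          simp [gatherB]
        rw [hsplit', h1, h2]
        simp
      · have hx' : getcardvalue x ∈ vs := by
          rcases List.mem_cons.mp hx with h | h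
          · exact absurd h hxv
          · exact h
        have hvx : getcardvalue x < v := hgt _ hx'
        rw [hsplit, insertBy_append_not _ _ _ _ ?hpass2, ih hp' hx']
        case hpass2 =>
          intro y hy
          have : getcardvalue y = v := by simpa using (List.mem_filter.mp hy).2
          simp [this]
          omega
        have h1 : (cs ++ [x]).filter (fun c => getcardvalue c == v)
            = cs.filter (fun c => getcardvalue c == v) := by
          simp [List.filter_append, hxv]
        have hsplit' : gatherB (v :: vs) (cs ++ [x])
            = (cs ++ [x]).filter (fun c => getcardvalue c == v) ++ gatherB vs (cs ++ [x]) := by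
          simp [gatherB]
        rw [hsplit', h1]

theorem sorted_snoc (ys : List Char) (x : Char) :
    PySem.List.sorted (ys ++ [x]) getcardvalue true
      = PySem.List.insertBy (fun a b => decide (getcardvalue b < getcardvalue a)) x
          (PySem.List.sorted ys getcardvalue true) := by
  rw [PySem.List.sorted_rev_eq_foldl_insertBy, PySem.List.sorted_rev_eq_foldl_insertBy,
    List.foldl_append]
  simp

theorem sorted_eq_gather (cs : List Char) :
    PySem.List.sorted cs getcardvalue true = gatherB pvOrder cs := by
  induction cs using List.reverseRecOn with
  | nil =>
      rw [PySem.List.sorted_rev_eq_foldl_insertBy]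
      simp [gatherB]
  | append_singleton cs x ih =>
      rw [sorted_snoc, ih, insert_gather pvOrder (by decide) x cs (key_mem x)]

theorem loopA_eq_sorted (cs : List Char) :
    cs.foldl (fun acc c => PySem.List.sorted (acc ++ [c]) getcardvalue true) []
      = PySem.List.sorted cs getcardvalue true := by
  induction cs using List.reverseRecOn with
  | nil =>
      rw [PySem.List.sorted_rev_eq_foldl_insertBy]
      rfl
  | append_singleton cs x ih =>
      rw [List.foldl_append]
      simp only [List.foldl_cons, List.foldl_nil]
      rw [ih, sorted_snoc (PySem.List.sorted cs getcardvalue true) x,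
        PySem.List.sorted_rev_sorted_rev, ← sorted_snoc cs x]

-- ===== VERDICT (by name: the statement is the Claim_ definition above) =====
theorem getsortedcards_spec : Claim_equal_getsortedcards := by
  intro cards _
  unfold Spec_getsortedcards getsortedcards getsortedcards_alt
  simp only [PySem.Str.len_eq]
  rw [PySem.List.foldl_pyRange_zero_pyGetD' cards.toList ' '
      (fun acc c => PySem.List.sorted (acc ++ [c]) getcardvalue true) [],
    loopA_eq_sorted]
  rw [PySem.List.foldl_pyRange_zero_pyGetD _ ' ' (fun s c => s ++ [c]) []]
  rw [PySem.List.foldl_append_singleton]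
  rw [List.nil_append, sorted_eq_gather]
  rfl
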